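-- pv_equiv track=rewrite | github.com/malkstar/advent-of-code | day5/part2.py | has_repeating_letter
-- ===== SOURCE A (Python) =====
-- def has_repeating_letter(string):
--     character_index_dict = {}
--     for i, char in enumerate(string):
--         if char in character_index_dict:
--             if i - character_index_dict[char] == 2:
--                 return True
--             else:
--                 character_index_dict[char] = i
--         else:
--             character_index_dict[char] = i
--     return False
-- ===== SOURCE B (Python) =====
-- def has_repeating_letter(string):
--     # Sliding window of three characters: a repeat with exactly one char
--     # between is a window (a, b, c) with a == c and b != a (b != a rules out
--     # runs like "xxx", where A keeps updating the last index and never sees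
--     # a gap of 2).
--     for a, b, c in zip(string, string[1:], string[2:]):
--         if a == c and b != a:
--             return True
--     return False
-- ===== Notes on version B (the rewrite author's own statement) =====
-- stated objective: simpler
-- what changed: Replaces the dict of last-seen indices with a direct sliding-window scan over triples (a,b,c), returning True when a == c and b != a; no dictionary state at all.
import Mathlib
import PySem

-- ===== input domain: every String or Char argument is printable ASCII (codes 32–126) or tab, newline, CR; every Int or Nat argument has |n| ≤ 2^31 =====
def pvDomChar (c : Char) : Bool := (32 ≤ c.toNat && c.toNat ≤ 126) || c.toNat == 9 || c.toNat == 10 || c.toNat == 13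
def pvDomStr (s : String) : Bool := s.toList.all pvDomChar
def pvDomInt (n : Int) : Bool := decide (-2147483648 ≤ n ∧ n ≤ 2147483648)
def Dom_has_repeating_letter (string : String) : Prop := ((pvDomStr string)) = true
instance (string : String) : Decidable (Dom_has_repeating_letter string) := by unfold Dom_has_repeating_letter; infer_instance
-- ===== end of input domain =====

-- B replaces A's dict of last-seen indices with a stateless sliding-window scan (simpler, same O(n) cost).

-- ===== PORT A =====
-- the enumerate loop with early return, dict mapping char -> last index seen
def haLoop (d : PySem.Dict Char Int) (i : Int) : List Char → Bool
  | [] => false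
  | c :: rest =>
    match d.get? c with
    | some j => if i - j = 2 then true else haLoop (d.insert c i) (i + 1) rest
    | none => haLoop (d.insert c i) (i + 1) rest

def has_repeating_letter (string : String) : Bool :=
  haLoop PySem.Dict.empty 0 string.toList

-- ===== PORT B =====
-- the zip(s, s[1:], s[2:]) sliding-window loop with early return
def winScan : List Char → Bool
  | a :: b :: c :: rest => if a = c ∧ b ≠ a then true else winScan (b :: c :: rest)
  | _ => false

def has_repeating_letter_alt (string : String) : Bool :=
  winScan string.toList

-- ===== PRECONDITION & SPEC =====
def Spec_has_repeating_letter (string : String) (out : Bool) : Prop := out = has_repeating_letter_alt string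
instance (string : String) (out : Bool) : Decidable (Spec_has_repeating_letter string out) := by unfold Spec_has_repeating_letter; infer_instance

-- ===== CLAIM (what is proved, stated in full; the proofs are below) =====
def Claim_equal_has_repeating_letter : Prop := ∀ (string : String), Dom_has_repeating_letter string → Spec_has_repeating_letter string (has_repeating_letter string)

-- ===== LEMMAS AND PROOFS =====

-- the last (up to) two characters already consumed, as an option
def optL : Option Char → List Char
  | none => []
  | some c => [c]

-- Invariant: d records last-seen indices; only the facts "some char was last
-- seen at i-1 (the previous char)" and "at i-2 and not since (the char two
-- back, unequal to the previous one)" matter to the rest of the run.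
theorem haLoop_eq_winScan (cs : List Char) :
    ∀ (d : PySem.Dict Char Int) (i : Int) (p2 prev : Option Char),
      (prev = none → p2 = none) →
      (∀ c j, d.get? c = some j → j < i) →
      (∀ c, d.get? c = some (i - 1) ↔ prev = some c) →
      (∀ c, d.get? c = some (i - 2) ↔ (p2 = some c ∧ prev ≠ some c)) →
      haLoop d i cs = winScan (optL p2 ++ optL prev ++ cs) := by
  induction cs with
  | nil =>
    intro d i p2 prev h0 _ _ _
    cases p2 <;> cases prev <;> simp [haLoop, winScan, optL]
  | cons c rest ih =>
    intro d i p2 prev h0 h1 h2 h3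
    have step : ∀ (hne : ¬ (p2 = some c ∧ prev ≠ some c)),
        haLoop (d.insert c i) (i + 1) rest
          = winScan (optL p2 ++ optL prev ++ c :: rest) := by
      intro hne
      have hrec : haLoop (d.insert c i) (i + 1) rest
          = winScan (optL prev ++ optL (some c) ++ rest) := by
        apply ih
        · intro h; exact absurd h (by simp)
        · intro c' j hj
          rw [PySem.Dict.get?_insert] at hj
          split_ifs at hj with he
          · simp at hj; omega
          · have := h1 c' j hj; omega
        · intro c'
          rw [PySem.Dict.get?_insert]
          split_ifs with he
          · simp [he]
          · constructor
            · intro hj; exact absurd (h1 c' _ hj) (by omega)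
            · intro hp; simp at hp; exact absurd hp.symm he
        · intro c'
          rw [PySem.Dict.get?_insert]
          split_ifs with he
          · constructor
            · intro hj; exfalso; simp at hj; omega
            · rintro ⟨-, hne'⟩; exfalso; exact hne' (by rw [he])
          · have heq : (i + 1 : Int) - 2 = i - 1 := by omega
            rw [heq, h2 c']
            constructor
            · intro hp; exact ⟨hp, by simp; exact fun h => he h.symm⟩
            · exact fun h => h.1
      rw [hrec]
      -- the first window of the old list (if any) does not fire
      cases hp2 : p2 with
      | none => simp [optL]
      | some x =>
        cases hprev : prev with
        | none => exact absurd (h0 hprev) (by simp [hp2])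
        | some y =>
          simp only [optL, List.cons_append, List.nil_append, winScan]
          rw [if_neg]
          rintro ⟨hxc, hyx⟩
          exact hne ⟨by rw [hp2, hxc], by rw [hprev]; simp; intro h; exact hyx (h ▸ hxc.symm)⟩
    show haLoop d i (c :: rest) = _
    rw [haLoop]
    cases hg : d.get? c with
    | some j =>
      dsimp only
      by_cases hij : i - j = 2
      · -- A returns true; the first window fires
        have hj : j = i - 2 := by omega
        have hcond := (h3 c).mp (hj ▸ hg)
        obtain ⟨hp2, hpr⟩ := hcond
        cases hprev : prev with
        | none => exact absurd (h0 hprev) (by simp [hp2])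
        | some y =>
          have hyc : y ≠ c := by rw [hprev] at hpr; simpa using fun h => hpr (by rw [h])
          simp [hij, hp2, optL, winScan, hyc]
      · rw [if_neg hij]
        apply step
        rintro ⟨hp2, hpr⟩
        have := (h3 c).mpr ⟨hp2, hpr⟩
        rw [hg] at this
        simp at this
        omega
    | none =>
      dsimp only
      apply step
      rintro ⟨hp2, hpr⟩
      have := (h3 c).mpr ⟨hp2, hpr⟩
      rw [hg] at this
      simp at this

-- ===== VERDICT (by name: the statement is the Claim_ definition above) =====
theorem has_repeating_letter_spec : Claim_equal_has_repeating_letter := by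
  intro s _
  show has_repeating_letter s = has_repeating_letter_alt s
  unfold has_repeating_letter has_repeating_letter_alt
  rw [haLoop_eq_winScan s.toList PySem.Dict.empty 0 none none]
  · rfl
  · intro h; rfl
  · intro c j h; simp [PySem.Dict.get?_empty] at h
  · intro c; simp [PySem.Dict.get?_empty]
  · intro c; simp [PySem.Dict.get?_empty]
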